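-- pv_equiv track=rewrite | github.com/ERoydev/Programming-Python-Advanced-SoftUni | File Handling - Exercise/Line Numbers.py | find_counters_in_lines_and_return_final_product
-- ===== SOURCE A (Python) =====
-- def find_counters_in_lines_and_return_final_product(lines):
--     final = ""
--     for idx, line in enumerate(lines):
--         punctuation_count, word_count = 0, 0
--         for el in line:
--             if el in "?!.,'-":
--                 punctuation_count += 1
--
--             if el.isalpha():
--                 word_count += 1
--
--         final += f"Line {idx+1}: {line.strip()} ({word_count})({punctuation_count})\n"
--     return final
-- ===== SOURCE B (Python) =====
-- def find_counters_in_lines_and_return_final_product(lines):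
--     parts = []
--     for idx, line in enumerate(lines):
--         counts = {}
--         for ch in line:
--             counts[ch] = counts.get(ch, 0) + 1
--         punctuation_count = sum(counts.get(ch, 0) for ch in "?!.,'-")
--         word_count = sum(n for ch, n in counts.items() if ch.isalpha())
--         parts.append(f"Line {idx+1}: {line.strip()} ({word_count})({punctuation_count})\n")
--     return "".join(parts)
-- ===== Notes on version B (the rewrite author's own statement) =====
-- stated objective: alternative
-- what changed: Per line, B builds a character-frequency dictionary once and derives the punctuation count by summing lookups over the six punctuation characters and the letter count by summing the frequencies of alphabetic keys, collecting the formatted lines into a list joined at the end, instead of A's per-character two-branch scan accumulating into a growing string.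
import Mathlib
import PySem

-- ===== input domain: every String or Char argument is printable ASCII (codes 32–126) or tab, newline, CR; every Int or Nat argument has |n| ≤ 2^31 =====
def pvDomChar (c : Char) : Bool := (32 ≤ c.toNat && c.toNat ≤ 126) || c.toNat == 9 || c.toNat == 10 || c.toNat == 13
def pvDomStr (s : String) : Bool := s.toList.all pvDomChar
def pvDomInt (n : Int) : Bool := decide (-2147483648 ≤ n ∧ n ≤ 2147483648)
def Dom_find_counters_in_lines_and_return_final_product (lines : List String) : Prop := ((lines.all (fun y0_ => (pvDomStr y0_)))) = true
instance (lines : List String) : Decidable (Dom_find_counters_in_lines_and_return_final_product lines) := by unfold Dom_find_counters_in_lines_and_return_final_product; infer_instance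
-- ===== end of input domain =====

-- B tabulates each line's character frequencies in a dictionary once and derives both counts
-- from the table (summing lookups of the six punctuation characters, and the frequencies of
-- alphabetic keys), joining the formatted lines at the end; alternative decomposition, same cost.

-- ===== PORT A =====
-- strings are handled as List Char via PySem.Chars (String.append is kernel-opaque);
-- `el in "?!.,'-"` for the single char el is List.contains (exact for one-char membership)
def find_counters_in_lines_and_return_final_product (lines : List String) : String :=
  String.ofList ((PySem.List.enumerate lines 0).foldl (fun final p =>
    let counts := p.2.toList.foldl
      (fun (pw : Int × Int) el =>
        (if ("?!.,'-".toList.contains el) then pw.1 + 1 else pw.1,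
         if PySem.Chars.isalpha el then pw.2 + 1 else pw.2)) (0, 0)
    final ++ ("Line ".toList ++ PySem.Int.toChars (p.1 + 1) ++ ": ".toList
      ++ PySem.Chars.strip p.2.toList ++ " (".toList ++ PySem.Int.toChars counts.2
      ++ ")(".toList ++ PySem.Int.toChars counts.1 ++ ")\n".toList)) [])

-- ===== PORT B =====
def find_counters_in_lines_and_return_final_product_alt (lines : List String) : String :=
  String.ofList (PySem.Chars.join [] ((PySem.List.enumerate lines 0).map (fun p =>
    let counts := p.2.toList.foldl (fun d ch => d.insert ch (d.getD ch 0 + 1))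
      (PySem.Dict.empty : PySem.Dict Char Int)
    let punctuation_count := "?!.,'-".toList.foldl (fun s ch => s + counts.getD ch 0) 0
    let word_count := counts.items.foldl
      (fun s q => if PySem.Chars.isalpha q.1 then s + q.2 else s) 0
    "Line ".toList ++ PySem.Int.toChars (p.1 + 1) ++ ": ".toList
      ++ PySem.Chars.strip p.2.toList ++ " (".toList ++ PySem.Int.toChars word_count
      ++ ")(".toList ++ PySem.Int.toChars punctuation_count ++ ")\n".toList)))

-- ===== PRECONDITION & SPEC =====
def Spec_find_counters_in_lines_and_return_final_product (lines : List String) (out : String) : Prop := out = find_counters_in_lines_and_return_final_product_alt lines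
instance (lines : List String) (out : String) : Decidable (Spec_find_counters_in_lines_and_return_final_product lines out) := by unfold Spec_find_counters_in_lines_and_return_final_product; infer_instance

-- ===== CLAIM (what is proved, stated in full; the proofs are below) =====
def Claim_equal_find_counters_in_lines_and_return_final_product : Prop := ∀ (lines : List String), Dom_find_counters_in_lines_and_return_final_product lines → Spec_find_counters_in_lines_and_return_final_product lines (find_counters_in_lines_and_return_final_product lines)

-- ===== LEMMAS AND PROOFS =====

-- A's growing-string fold is the flatten of the per-line pieces
theorem pv_foldl_append {α : Type} (f : α → List Char) :
    ∀ (l : List α) (acc : List Char),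
      l.foldl (fun fin x => fin ++ f x) acc = acc ++ (l.map f).flatten := by
  intro l
  induction l with
  | nil => simp
  | cons x xs ih => intro acc; simp [List.foldl_cons, ih]

-- "".join = flatten
theorem pv_join_nil_flatten : ∀ (l : List (List Char)), PySem.Chars.join [] l = l.flatten := by
  intro l
  induction l with
  | nil => rfl
  | cons x xs ih =>
    cases xs with
    | nil => simp [PySem.Chars.join_singleton]
    | cons y ys => simpa [PySem.Chars.join_cons_cons] using ih

-- A's inner two-counter scan counts the two predicates
theorem pv_two_counters (ps : List Char) :
    ∀ (cs : List Char) (p w : Int),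
      cs.foldl (fun (pw : Int × Int) el =>
          (if ps.contains el then pw.1 + 1 else pw.1,
           if PySem.Chars.isalpha el then pw.2 + 1 else pw.2)) (p, w)
        = (p + (cs.countP (fun c => ps.contains c) : Int),
           w + (cs.countP (fun c => PySem.Chars.isalpha c) : Int)) := by
  intro cs
  induction cs with
  | nil => intro p w; simp
  | cons c cs ih =>
    intro p w
    rw [List.foldl_cons, ih]
    by_cases h1 : c ∈ ps <;> by_cases h2 : PySem.Chars.isalpha c = true <;>
      simp [h1, h2, List.countP_cons] <;> push_cast <;> omega

-- splitting a membership countP at the head of a duplicate-free key list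
theorem pv_countP_mem_cons (k : Char) (rest : List Char) (hk : k ∉ rest) :
    ∀ cs : List Char,
      cs.countP (fun c => decide (c ∈ k :: rest))
        = cs.count k + cs.countP (fun c => decide (c ∈ rest)) := by
  intro cs
  induction cs with
  | nil => simp
  | cons c cs ih =>
    rw [List.countP_cons, List.countP_cons, List.count_cons, ih]
    by_cases hck : c = k
    · subst hck
      have hr : c ∉ rest := hk
      simp [hr] <;> omega
    · by_cases hr : c ∈ rest <;> simp [hck, hr] <;> omega

-- summing per-key counts over a duplicate-free key list is a membership countP
theorem pv_sum_counts :
    ∀ (ps : List Char), ps.Nodup → ∀ (cs : List Char),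
      ((ps.map (fun k => (cs.count k : Int))).sum)
        = (cs.countP (fun c => decide (c ∈ ps)) : Int) := by
  intro ps
  induction ps with
  | nil => intro _ cs; simp
  | cons k rest ih =>
    intro hnd cs
    rw [List.map_cons, List.sum_cons, ih (List.nodup_cons.mp hnd).2 cs,
      pv_countP_mem_cons k rest (List.nodup_cons.mp hnd).1 cs]
    push_cast
    ring

-- a guarded summing fold is the sum over the filtered list
theorem pv_foldl_if_add {α : Type} (p : α → Bool) (g : α → Int) :
    ∀ (l : List α) (a : Int),
      l.foldl (fun s x => if p x then s + g x else s) a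
        = a + ((l.filter p).map g).sum := by
  intro l
  induction l with
  | nil => intro a; simp
  | cons x xs ih =>
    intro a
    by_cases h : p x <;> simp [List.foldl_cons, h, ih] <;> ring

-- B's punctuation sum over the dictionary equals A's punctuation counter
theorem pv_punct (cs : List Char) :
    ("?!.,'-".toList.foldl
        (fun s ch => s + (cs.foldl (fun d x => d.insert x (d.getD x 0 + 1))
            (PySem.Dict.empty : PySem.Dict Char Int)).getD ch 0) 0)
      = (cs.countP (fun c => "?!.,'-".toList.contains c) : Int) := by
  rw [PySem.Dict.foldl_insert_getD_add_one_eq_counter, PySem.List.foldl_add, zero_add]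
  have h2 : ("?!.,'-".toList.map (fun ch => (PySem.Dict.counter cs).getD ch 0))
      = ("?!.,'-".toList.map (fun k => (cs.count k : Int))) :=
    List.map_congr_left (fun k _ => by simp [PySem.Dict.getD_counter])
  rw [h2, pv_sum_counts "?!.,'-".toList (by decide) cs]
  exact congrArg _ (List.countP_congr (by intro c _; simp))

-- B's sum of alphabetic frequencies over the dictionary equals A's letter counter
theorem pv_word (cs : List Char) :
    ((cs.foldl (fun d x => d.insert x (d.getD x 0 + 1))
        (PySem.Dict.empty : PySem.Dict Char Int)).items.foldl
      (fun s q => if PySem.Chars.isalpha q.1 then s + q.2 else s) 0)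
      = (cs.countP (fun c => PySem.Chars.isalpha c) : Int) := by
  rw [PySem.Dict.foldl_insert_getD_add_one_eq_counter, PySem.Dict.items_counter,
    pv_foldl_if_add, zero_add, List.filter_map, List.map_map]
  have hps : ((PySem.Set.ofList cs : List Char).filter
      (fun k => PySem.Chars.isalpha k)).Nodup :=
    (PySem.Set.nodup_ofList cs).filter _
  rw [show ((fun (q : Char × Int) => PySem.Chars.isalpha q.1) ∘
        (fun k => (k, (cs.count k : Int)))) = (fun k => PySem.Chars.isalpha k) from rfl,
    show ((fun (q : Char × Int) => q.2) ∘ (fun k => (k, (cs.count k : Int))))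
        = (fun k => (cs.count k : Int)) from rfl,
    pv_sum_counts _ hps cs]
  apply congrArg
  apply List.countP_congr
  intro c hc
  simp [List.mem_filter, PySem.Set.mem_ofList, hc]

-- ===== VERDICT (by name: the statement is the Claim_ definition above) =====
theorem find_counters_in_lines_and_return_final_product_spec : Claim_equal_find_counters_in_lines_and_return_final_product := by
  intro lines _
  unfold Spec_find_counters_in_lines_and_return_final_product
  unfold find_counters_in_lines_and_return_final_product find_counters_in_lines_and_return_final_product_alt
  rw [pv_join_nil_flatten, pv_foldl_append, List.nil_append]
  apply congrArg
  apply congrArg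
  apply List.map_congr_left
  intro p _
  simp only [pv_two_counters, pv_punct, pv_word, zero_add]
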